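-- pv_equiv track=rewrite | github.com/kalisnetwork/compliance-sentinel | compliance_sentinel/config/validator.py | _is_valid_glob_pattern
-- ===== SOURCE A (Python) =====
-- def _is_valid_glob_pattern(pattern: str) -> bool:
--     """Check if a glob pattern is valid."""
--     try:
--         # Basic validation - check for invalid characters
--         invalid_chars = ['<', '>', '|', '"']
--         if any(char in pattern for char in invalid_chars):
--             return False
--
--         # Check for balanced brackets
--         if pattern.count('[') != pattern.count(']'):
--             return False
--
--         if pattern.count('{') != pattern.count('}'):
--             return False
--
--         return True
--     except Exception:
--         return False
-- ===== SOURCE B (Python) =====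
-- def _is_valid_glob_pattern(pattern: str) -> bool:
--     """Single pass: reject invalid chars immediately, track bracket/brace count deltas."""
--     sq = cu = 0
--     for ch in pattern:
--         if ch in '<>|"':
--             return False
--         elif ch == '[':
--             sq += 1
--         elif ch == ']':
--             sq -= 1
--         elif ch == '{':
--             cu += 1
--         elif ch == '}':
--             cu -= 1
--     return sq == 0 and cu == 0
-- ===== Notes on version B (the rewrite author's own statement) =====
-- stated objective: simpler
-- what changed: Replaced four separate scans (an any-membership test plus four .count() passes) by one pass over the characters maintaining two signed counters and returning False on the first invalid character.
import Mathlib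
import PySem

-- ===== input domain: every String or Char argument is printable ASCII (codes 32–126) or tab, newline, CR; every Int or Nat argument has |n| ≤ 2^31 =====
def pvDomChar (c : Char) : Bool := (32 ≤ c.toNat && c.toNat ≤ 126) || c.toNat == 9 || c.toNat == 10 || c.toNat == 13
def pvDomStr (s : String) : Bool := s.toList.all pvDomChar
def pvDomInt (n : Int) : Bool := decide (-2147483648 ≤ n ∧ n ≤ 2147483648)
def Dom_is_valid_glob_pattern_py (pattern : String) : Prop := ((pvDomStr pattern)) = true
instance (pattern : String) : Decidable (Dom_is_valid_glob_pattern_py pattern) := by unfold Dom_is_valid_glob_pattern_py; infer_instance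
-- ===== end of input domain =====

-- B replaces A's five scans (any-membership + four .count passes) by one pass with two counters; objective: simpler.

-- ===== PORT A =====
def is_valid_glob_pattern_py (pattern : String) : Bool :=
  if ['<', '>', '|', '"'].any (fun c => pattern.toList.contains c) then false
  else if pattern.toList.count '[' ≠ pattern.toList.count ']' then false
  else if pattern.toList.count '{' ≠ pattern.toList.count '}' then false
  else true

-- ===== PORT B =====
def globAltGo : List Char → Int → Int → Bool
  | [], sq, cu => sq == 0 && cu == 0
  | c :: cs, sq, cu =>
    if c = '<' ∨ c = '>' ∨ c = '|' ∨ c = '"' then false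
    else if c = '[' then globAltGo cs (sq + 1) cu
    else if c = ']' then globAltGo cs (sq - 1) cu
    else if c = '{' then globAltGo cs sq (cu + 1)
    else if c = '}' then globAltGo cs sq (cu - 1)
    else globAltGo cs sq cu

def is_valid_glob_pattern_py_alt (pattern : String) : Bool :=
  globAltGo pattern.toList 0 0

-- ===== PRECONDITION & SPEC =====
def Spec_is_valid_glob_pattern_py (pattern : String) (out : Bool) : Prop := out = is_valid_glob_pattern_py_alt pattern
instance (pattern : String) (out : Bool) : Decidable (Spec_is_valid_glob_pattern_py pattern out) := by unfold Spec_is_valid_glob_pattern_py; infer_instance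

-- ===== CLAIM (what is proved, stated in full; the proofs are below) =====
def Claim_equal_is_valid_glob_pattern_py : Prop := ∀ (pattern : String), Dom_is_valid_glob_pattern_py pattern → Spec_is_valid_glob_pattern_py pattern (is_valid_glob_pattern_py pattern)

-- ===== LEMMAS AND PROOFS =====

lemma globAltGo_eq (cs : List Char) (sq cu : Int) :
    globAltGo cs sq cu =
      ((cs.all fun c => !(c == '<' || c == '>' || c == '|' || c == '"')) &&
        decide (sq + (cs.count '[' : Int) - (cs.count ']' : Int) = 0) &&
        decide (cu + (cs.count '{' : Int) - (cs.count '}' : Int) = 0)) := by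
  induction cs generalizing sq cu with
  | nil => by_cases hs : sq = 0 <;> by_cases hc : cu = 0 <;> simp [globAltGo, hs, hc]
  | cons c cs ih =>
    by_cases hinv : c = '<' ∨ c = '>' ∨ c = '|' ∨ c = '"'
    · rcases hinv with h | h | h | h <;> subst h <;> simp [globAltGo]
    · push_neg at hinv
      obtain ⟨h1, h2, h3, h4⟩ := hinv
      by_cases e1 : c = '['
      · subst e1
        simp [globAltGo, ih, List.count_cons]
        congr 2 <;> · first | (rw [decide_eq_decide]; omega) | (rw [eq_iff_iff]; omega)
      · by_cases e2 : c = ']'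
        · subst e2
          simp [globAltGo, ih, List.count_cons]
          congr 2 <;> · first | (rw [decide_eq_decide]; omega) | (rw [eq_iff_iff]; omega)
        · by_cases e3 : c = '{'
          · subst e3
            simp [globAltGo, ih, List.count_cons]
            congr 2 <;> · first | (rw [decide_eq_decide]; omega) | (rw [eq_iff_iff]; omega)
          · by_cases e4 : c = '}'
            · subst e4
              simp [globAltGo, ih, List.count_cons]
              congr 2 <;> · first | (rw [decide_eq_decide]; omega) | (rw [eq_iff_iff]; omega)
            · have f1 : (c == '<') = false := by simp [h1]
              have f2 : (c == '>') = false := by simp [h2]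
              have f3 : (c == '|') = false := by simp [h3]
              have f4 : (c == '"') = false := by simp [h4]
              simp [globAltGo, h1, h2, h3, h4, e1, e2, e3, e4, ih, List.count_cons, f1, f2, f3, f4]

lemma inv_any_eq (cs : List Char) :
    (['<', '>', '|', '"'].any fun c => cs.contains c) =
      cs.any (fun c => c == '<' || c == '>' || c == '|' || c == '"') := by
  rw [Bool.eq_iff_iff]
  simp [List.any_eq_true]
  constructor
  · rintro (h | h | h | h) <;> exact ⟨_, h, by simp⟩
  · rintro ⟨x, hx, h⟩
    rcases h with ((h | h) | h) | h <;> subst h <;> simp [hx]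

-- ===== VERDICT (by name: the statement is the Claim_ definition above) =====
theorem is_valid_glob_pattern_py_spec : Claim_equal_is_valid_glob_pattern_py := by
  intro pattern _
  unfold Spec_is_valid_glob_pattern_py is_valid_glob_pattern_py is_valid_glob_pattern_py_alt
  rw [globAltGo_eq, inv_any_eq]
  have hall : (pattern.toList.all fun c => !(c == '<' || c == '>' || c == '|' || c == '"')) =
      !(pattern.toList.any fun c => c == '<' || c == '>' || c == '|' || c == '"') := by
    simp [List.all_eq_not_any_not]
  rw [hall]
  by_cases h : (pattern.toList.any fun c => c == '<' || c == '>' || c == '|' || c == '"') = true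
  · simp [h]
  · simp only [Bool.not_eq_true] at h
    simp only [h, Bool.not_false, Bool.true_and]
    by_cases h1 : pattern.toList.count '[' = pattern.toList.count ']' <;>
      by_cases h2 : pattern.toList.count '{' = pattern.toList.count '}' <;>
        simp [h1, h2] <;> omega
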